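-- pv_equiv track=rewrite | github.com/ignaciomurillo97/IntroTallerProgramas | Matrces.py | esMatriz
-- ===== SOURCE A (Python) =====
-- def esMatriz (matriz):
--     if not isinstance(matriz, list):
--         return False
--     for i in range(len(matriz)):
--         if not isinstance(matriz[i], list):
--             return False
--         if not all(isinstance(x, (float, int)) for x in matriz[i]):
--             return False
--
--         if len(matriz[i]) != len(matriz[i-1]):
--             return False
--
--     return True
-- ===== SOURCE B (Python) =====
-- def esMatriz(matriz):
--     if not isinstance(matriz, list):
--         return False
--     lo = hi = None
--     for r in matriz:
--         if not isinstance(r, list):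
--             return False
--         for x in r:
--             if not isinstance(x, (float, int)):
--                 return False
--         n = len(r)
--         if lo is None:
--             lo = hi = n
--         else:
--             if n < lo:
--                 lo = n
--             if n > hi:
--                 hi = n
--     return lo == hi
-- ===== Notes on version B (the rewrite author's own statement) =====
-- stated objective: alternative
-- what changed: Decides row-length uniformity by accumulating the running minimum and maximum of row lengths and testing min == max at the end, instead of A's cyclic comparison of each row's length with matriz[i-1]; B never compares two rows to each other and has no early exit on a length mismatch.
import Mathlib
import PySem

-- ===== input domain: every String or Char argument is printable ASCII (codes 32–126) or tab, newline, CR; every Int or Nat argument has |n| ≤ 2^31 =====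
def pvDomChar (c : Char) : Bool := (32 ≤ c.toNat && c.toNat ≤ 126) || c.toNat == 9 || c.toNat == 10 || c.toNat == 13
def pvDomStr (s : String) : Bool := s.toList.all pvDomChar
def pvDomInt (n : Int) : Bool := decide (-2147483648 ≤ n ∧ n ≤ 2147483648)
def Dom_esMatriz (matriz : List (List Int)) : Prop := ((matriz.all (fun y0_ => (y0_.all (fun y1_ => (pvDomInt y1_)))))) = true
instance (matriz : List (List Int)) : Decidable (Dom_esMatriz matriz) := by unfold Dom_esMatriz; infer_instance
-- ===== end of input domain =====

-- B accumulates the running min/max of row lengths and tests min == max, instead of A's cyclic matriz[i-1] comparison; return value only, no mutation.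

-- ===== PORT A =====
-- 'for i in range(len(matriz))', early return on a failed check; under the type
-- List (List Int) the two isinstance guards are always true and are omitted.
def esMatrizGo (matriz : List (List Int)) : Nat → Nat → Bool
  | 0, _ => true
  | fuel+1, i =>
    match PySem.List.pyGet? matriz (i : Int), PySem.List.pyGet? matriz ((i : Int) - 1) with
    | some row, some prev =>
        if row.length ≠ prev.length then false else esMatrizGo matriz fuel (i+1)
    | _, _ => false   -- unreachable: 0 ≤ i < len and -len ≤ i-1 < len

def esMatriz (matriz : List (List Int)) : Bool :=
  esMatrizGo matriz matriz.length 0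

-- ===== PORT B =====
-- the loop's accumulator: None before the first row, then (lo, hi)
def esMatrizAltStep (st : Option (Nat × Nat)) (r : List Int) : Option (Nat × Nat) :=
  let n := r.length
  match st with
  | none => some (n, n)
  | some (lo, hi) => some (if n < lo then n else lo, if hi < n then n else hi)

def esMatriz_alt (matriz : List (List Int)) : Bool :=
  match matriz.foldl esMatrizAltStep none with
  | none => true                      -- lo == hi with both None
  | some (lo, hi) => lo == hi

-- ===== PRECONDITION & SPEC =====
def Spec_esMatriz (matriz : List (List Int)) (out : Bool) : Prop := out = esMatriz_alt matriz
instance (matriz : List (List Int)) (out : Bool) : Decidable (Spec_esMatriz matriz out) := by unfold Spec_esMatriz; infer_instance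

-- ===== CLAIM (what is proved, stated in full; the proofs are below) =====
def Claim_equal_esMatriz : Prop := ∀ (matriz : List (List Int)), Dom_esMatriz matriz → Spec_esMatriz matriz (esMatriz matriz)

-- ===== LEMMAS AND PROOFS =====

theorem fold_minmax_iff (xs : List (List Int)) :
    ∀ lo hi, lo ≤ hi →
    ((match xs.foldl esMatrizAltStep (some (lo, hi)) with
      | none => true
      | some (a, b) => a == b) = true ↔ lo = hi ∧ ∀ r ∈ xs, r.length = lo) := by
  induction xs with
  | nil => intro lo hi h; simp
  | cons r t ih =>
      intro lo hi h
      simp only [List.foldl_cons, esMatrizAltStep]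
      rw [ih _ _ (by split_ifs <;> omega)]
      constructor
      · rintro ⟨h1, h2⟩
        split_ifs at h1 h2 <;>
          exact ⟨by omega, fun s hs => by
            rcases List.mem_cons.mp hs with rfl | hs
            · omega
            · have := h2 s hs; omega⟩
      · rintro ⟨h1, h2⟩
        have hr : r.length = lo := h2 r (by simp)
        refine ⟨by split_ifs <;> omega, fun s hs => ?_⟩
        have := h2 s (List.mem_cons_of_mem _ hs)
        split_ifs <;> omega

theorem alt_iff (matriz : List (List Int)) :
    esMatriz_alt matriz = true ↔ ∀ r ∈ matriz, r.length = (matriz.headD []).length := by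
  cases matriz with
  | nil => simp [esMatriz_alt]
  | cons a t =>
      simp only [esMatriz_alt, List.foldl_cons, esMatrizAltStep, List.headD_cons]
      rw [fold_minmax_iff t a.length a.length le_rfl]
      constructor
      · rintro ⟨-, h2⟩ r hr
        rcases List.mem_cons.mp hr with rfl | hr
        · rfl
        · exact h2 r hr
      · intro h
        exact ⟨rfl, fun r hr => h r (List.mem_cons_of_mem _ hr)⟩

-- the loop body of A from index i (1 ≤ i), with fuel = n - i
theorem go_iff (matriz : List (List Int)) :
    ∀ fuel i, 1 ≤ i → i + fuel = matriz.length →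
    (esMatrizGo matriz fuel i = true ↔
      ∀ j, i ≤ j → (hj : j < matriz.length) →
        matriz[j].length = (matriz[j-1]'(by omega)).length) := by
  intro fuel
  induction fuel with
  | zero =>
      intro i h1 hn
      simp only [esMatrizGo, true_iff]
      intro j hij hj; omega
  | succ fuel ih =>
      intro i h1 hn
      have hi : i < matriz.length := by omega
      have hcur : PySem.List.pyGet? matriz (i : Int) = some (matriz[i]) :=
        PySem.List.pyGet?_ofNat matriz i hi
      have hcast : ((i : Int) - 1) = ((i - 1 : Nat) : Int) := by omega
      have hprev : PySem.List.pyGet? matriz ((i : Int) - 1) = some (matriz[i-1]'(by omega)) := by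
        rw [hcast]; exact PySem.List.pyGet?_ofNat matriz (i-1) (by omega)
      simp only [esMatrizGo, hcur, hprev]
      by_cases heq : (matriz[i]).length = (matriz[i-1]'(by omega)).length
      · simp only [heq, ne_eq, not_true_eq_false, ite_false]
        rw [ih (i+1) (by omega) (by omega)]
        constructor
        · intro h j hij hj
          rcases Nat.eq_or_lt_of_le hij with rfl | hlt
          · exact heq
          · exact h j hlt hj
        · intro h j hij hj
          exact h j (by omega) hj
      · simp only [heq, ne_eq, not_false_eq_true, if_pos]
        constructor
        · intro hc; cases hc
        · intro hAll; exact (heq (hAll i le_rfl hi)).elim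

theorem chain_all (matriz : List (List Int))
    (h : ∀ j, 1 ≤ j → (hj : j < matriz.length) →
        matriz[j].length = (matriz[j-1]'(by omega)).length) :
    ∀ j, (hj : j < matriz.length) → matriz[j].length = (matriz.headD []).length := by
  intro j
  induction j with
  | zero =>
      intro hj
      cases matriz with
      | nil => simp at hj
      | cons a t => simp
  | succ k ihk =>
      intro hj
      have h2 := h (k+1) (by omega) hj
      simp only [Nat.add_sub_cancel] at h2
      rw [h2]
      exact ihk (by omega)

theorem A_iff (matriz : List (List Int)) :
    esMatriz matriz = true ↔ ∀ r ∈ matriz, r.length = (matriz.headD []).length := by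
  cases matriz with
  | nil => simp [esMatriz, esMatrizGo]
  | cons a t =>
      set m := a :: t with hm
      have hlen : 0 < m.length := by simp [hm]
      simp only [esMatriz]
      have h0 := PySem.List.pyGet?_ofNat m 0 hlen
      have hneg : PySem.List.pyGet? m (((0:ℕ) : Int) - 1) = some (m[m.length - 1]'(by omega)) := by
        have he : (((0:ℕ) : Int) - 1) = (-1 : Int) := by simp
        rw [he, PySem.List.pyGet?_neg_one, List.getLast?_eq_getElem?]
        simp [List.getElem?_eq_getElem (by omega : m.length - 1 < m.length)]
      obtain ⟨fuel, hf⟩ : ∃ fuel, m.length = fuel + 1 := ⟨t.length, by simp [hm]⟩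
      rw [hf]
      simp only [esMatrizGo, h0, hneg]
      by_cases hfst : (m[0]'hlen).length = (m[m.length-1]'(by omega)).length
      · simp only [hfst, ne_eq, not_true_eq_false, ite_false]
        rw [show fuel = m.length - 1 by omega]
        rw [go_iff m (m.length - 1) 1 (by omega) (by omega)]
        constructor
        · intro h r hr
          obtain ⟨j, hj, rfl⟩ := List.mem_iff_getElem.mp hr
          exact chain_all m (fun j h1 hj => h j h1 hj) j hj
        · intro h j h1 hj
          rw [h _ (List.getElem_mem hj), h _ (List.getElem_mem (by omega : j - 1 < m.length))]
      · simp only [hfst, ne_eq, not_false_eq_true, if_pos]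
        constructor
        · intro hc; cases hc
        · intro h
          exact (hfst (by
            rw [h _ (List.getElem_mem hlen),
              h _ (List.getElem_mem (by omega : m.length - 1 < m.length))])).elim

-- ===== VERDICT (by name: the statement is the Claim_ definition above) =====
theorem esMatriz_spec : Claim_equal_esMatriz := by
  intro matriz _
  unfold Spec_esMatriz
  have hA := A_iff matriz
  have hB := alt_iff matriz
  by_cases h : ∀ r ∈ matriz, r.length = (matriz.headD []).length
  · rw [hA.mpr h, hB.mpr h]
  · have a1 : esMatriz matriz ≠ true := fun hc => h (hA.mp hc)
    have b1 : esMatriz_alt matriz ≠ true := fun hc => h (hB.mp hc)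
    simp only [Bool.not_eq_true] at a1 b1
    rw [a1, b1]
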